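-- pv_equiv track=rewrite | github.com/eduardagomess/cryptopals-crypto-challenges | challenge5.py | formartHex
-- ===== SOURCE A (Python) =====
-- def binary_hex():
--
--     binary_hex_table = {"0000":0, "0001":1, "0010":2, "0011": 3,"0100":4,
--                     "0101":5,"0110":6,"0111":7, "1000":8, "1001":9,
--                     "1010": "A", "1011":"B", "1100":"C", "1101":"D","1110":"E", "1111":"F"}
--
--     return binary_hex_table
--
-- def ascii_to_bin():
--     ascii_to_bin_dictionary = {}
--     for num in range(255):
--         ascii_to_bin_dictionary[chr(num)] = "{:08b}".format(num)
--     return ascii_to_bin_dictionary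
--
-- def formartHex(string):
--     string_binary = ""
--
--     for charact in string:
--         string_binary += ascii_to_bin()[charact]
--
--     binary_list = []
--     for num in range(0, len(string_binary), 4):
--         binary_list.append(string_binary[num:num+4])
--
--     string_hex = ""
--     for num in binary_list:
--         string_hex += str(binary_hex()[num]).upper()
--
--     return string_hex
-- ===== SOURCE B (Python) =====
-- def formartHex(string):
--     # One lookup table char -> two uppercase hex digits; single pass.
--     # range(255), like A's table, so ord >= 255 raises KeyError exactly as A does.
--     table = {chr(n): '%02X' % n for n in range(255)}
--     return ''.join(table[c] for c in string)
-- ===== Notes on version B (the rewrite author's own statement) =====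
-- stated objective: faster
-- what changed: Replaces A's three passes (chars -> concatenated 8-bit binary string, re-chunking into nibbles, nibble -> hex-digit table with str().upper()) by one precomputed char -> two-hex-digit table and a single join over the input.
import Mathlib
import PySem

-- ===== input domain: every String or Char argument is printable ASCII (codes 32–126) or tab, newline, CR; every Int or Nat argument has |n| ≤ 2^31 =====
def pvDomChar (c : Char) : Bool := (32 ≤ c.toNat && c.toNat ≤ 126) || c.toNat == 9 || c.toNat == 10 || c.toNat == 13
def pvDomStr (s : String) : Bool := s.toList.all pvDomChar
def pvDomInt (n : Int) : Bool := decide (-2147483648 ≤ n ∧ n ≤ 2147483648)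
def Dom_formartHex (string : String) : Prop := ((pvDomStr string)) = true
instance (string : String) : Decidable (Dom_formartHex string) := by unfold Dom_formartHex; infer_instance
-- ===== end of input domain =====

-- B replaces A's three passes (binary concatenation, nibble re-chunking, nibble→hex table)
-- by one char→two-hex-digit table and a single pass: simpler.

-- ===== PORT A =====
-- ascii_to_bin(): the dict {chr(n): "{:08b}".format(n) for n in range(255)} ported as the
-- function it tabulates; exact for ord(c) < 255 (Dom admits only ord ≤ 126, so every lookup hits).
def asciiToBin (c : Char) : List Char :=
  PySem.Chars.zfill (PySem.Int.toBinChars (c.toNat : Int)) 8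

-- binary_hex(): the literal 16-entry dict; values are Python ints 0..9 or strings "A".."F".
def binaryHexTable : PySem.Dict (List Char) (Sum Int (List Char)) :=
  PySem.Dict.ofList
    [("0000".toList, .inl 0), ("0001".toList, .inl 1), ("0010".toList, .inl 2),
     ("0011".toList, .inl 3), ("0100".toList, .inl 4), ("0101".toList, .inl 5),
     ("0110".toList, .inl 6), ("0111".toList, .inl 7), ("1000".toList, .inl 8),
     ("1001".toList, .inl 9), ("1010".toList, .inr "A".toList), ("1011".toList, .inr "B".toList),
     ("1100".toList, .inr "C".toList), ("1101".toList, .inr "D".toList),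
     ("1110".toList, .inr "E".toList), ("1111".toList, .inr "F".toList)]

-- str(v) on the mixed-type dict value
def strOfVal : Sum Int (List Char) → List Char
  | .inl n => PySem.Int.toChars n
  | .inr s => s

def formartHex (string : String) : String :=
  -- string_binary += ascii_to_bin()[charact]
  let stringBinary : List Char := string.toList.foldl (fun acc c => acc ++ asciiToBin c) []
  -- binary_list.append(string_binary[num:num+4]) for num in range(0, len, 4)
  let binaryList : List (List Char) :=
    (PySem.List.pyRange 0 (PySem.List.len stringBinary) 4).foldl
      (fun acc n => acc ++ [PySem.List.slice stringBinary (some n) (some (n + 4))]) []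
  -- string_hex += str(binary_hex()[num]).upper()  (every chunk is a 4-bit key, default unused)
  let stringHex : List Char := binaryList.foldl
    (fun acc chunk => acc ++ PySem.Chars.upper (strOfVal (binaryHexTable.getD chunk (.inl 0)))) []
  String.ofList stringHex

-- ===== PORT B =====
-- '%02X' % n: two uppercase hex digits; exact for 0 ≤ n < 256 (the table's whole range)
def hexDigit (n : Nat) : Char :=
  if n < 10 then Char.ofNat ('0'.toNat + n) else Char.ofNat ('A'.toNat + n - 10)
def hexPair (n : Nat) : List Char := [hexDigit (n / 16), hexDigit (n % 16)]

-- table = {chr(n): '%02X' % n for n in range(255)}, ported as the function it tabulates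
-- (exact for ord(c) < 255; Dom admits only ord ≤ 126); ''.join(table[c] for c in string).
def formartHex_alt (string : String) : String :=
  String.ofList (string.toList.flatMap (fun c => hexPair c.toNat))

-- ===== PRECONDITION & SPEC =====
def Spec_formartHex (string : String) (out : String) : Prop := out = formartHex_alt string
instance (string : String) (out : String) : Decidable (Spec_formartHex string out) := by unfold Spec_formartHex; infer_instance

-- ===== CLAIM (what is proved, stated in full; the proofs are below) =====
def Claim_equal_formartHex : Prop := ∀ (string : String), Dom_formartHex string → Spec_formartHex string (formartHex string)

-- ===== LEMMAS AND PROOFS =====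

-- every domain character's binary block has 8 bits (all 127 codes checked at once)
set_option maxRecDepth 8192 in
lemma asciiToBin_length (c : Char) (h : c.toNat < 127) : (asciiToBin c).length = 8 := by
  have key : ∀ n : Fin 127, (asciiToBin (Char.ofNat n.val)).length = 8 := by decide
  have := key ⟨c.toNat, h⟩
  simpa [Char.ofNat_toNat] using this

-- per character: A's two nibble lookups equal B's two hex digits (all 127 codes by decide)
set_option maxRecDepth 8192 in
lemma block_eq (c : Char) (h : c.toNat < 127) :
    PySem.Chars.upper (strOfVal (binaryHexTable.getD ((asciiToBin c).take 4) (.inl 0))) ++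
      PySem.Chars.upper (strOfVal (binaryHexTable.getD ((asciiToBin c).drop 4) (.inl 0))) =
    hexPair c.toNat := by
  have key : ∀ n : Fin 127,
      PySem.Chars.upper (strOfVal (binaryHexTable.getD ((asciiToBin (Char.ofNat n.val)).take 4) (.inl 0))) ++
        PySem.Chars.upper (strOfVal (binaryHexTable.getD ((asciiToBin (Char.ofNat n.val)).drop 4) (.inl 0))) =
      hexPair (Char.ofNat n.val).toNat := by decide
  have := key ⟨c.toNat, h⟩
  simpa [Char.ofNat_toNat] using this

-- A's chunking loop over a list of length 8*m yields the slices at 0, 4, …, 8m-4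
lemma chunk_blocks_core (L : List Char) (m : Nat) (hlen : L.length = 8 * m) :
    (PySem.List.pyRange 0 (PySem.List.len L) 4).foldl
      (fun acc n => acc ++ [PySem.List.slice L (some n) (some (n + 4))]) [] =
    (List.range (2 * m)).map (fun k => (L.drop (4 * k)).take 4) := by
  rw [PySem.List.foldl_append_singleton_eq_map, List.nil_append]
  rw [PySem.List.pyRange_of_pos _ _ (by norm_num), List.map_map]
  have hcnt : (if (0:Int) < PySem.List.len L then ((PySem.List.len L - 0 + 4 - 1) / 4).toNat else 0)
      = 2 * m := by
    simp only [PySem.List.len_eq, hlen]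
    push_cast
    split <;> omega
  rw [hcnt]
  apply List.map_congr_left
  intro k _
  show PySem.List.slice L (some (0 + 4 * (k:Int))) (some (0 + 4 * (k:Int) + 4)) = _
  have : (0 + 4 * (k:Int)) = ((4*k : Nat) : Int) := by push_cast; ring
  rw [this, show ((4*k:Nat):Int) + 4 = ((4*k:Nat):Int) + ((4:Nat):Int) by norm_num,
    PySem.List.slice_natCast_add]

-- the slices of a concatenation of 8-blocks are the two nibbles of each block, in order
lemma map_range_chunks (l : List (List Char)) (h : ∀ b ∈ l, b.length = 8) :
    (List.range (2 * l.length)).map (fun k => (l.flatten.drop (4 * k)).take 4) =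
    l.flatMap (fun b => [b.take 4, b.drop 4]) := by
  induction l with
  | nil => simp
  | cons b t ih =>
    have hb : b.length = 8 := h b (by simp)
    have h2 : 2 * (b :: t).length = 2 + 2 * t.length := by simp; ring
    rw [h2, List.range_add, List.map_append, List.map_map]
    have e0 : ((b :: t).flatten.drop (4 * 0)).take 4 = b.take 4 := by
      rw [List.flatten_cons, show 4 * 0 = 0 by rfl, List.drop_zero]
      exact List.take_append_of_le_length (by omega)
    have e1 : ((b :: t).flatten.drop (4 * 1)).take 4 = b.drop 4 := by
      rw [List.flatten_cons, show 4 * 1 = 4 by rfl, List.drop_append_of_le_length (by omega)]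
      rw [List.take_append_of_le_length (by rw [List.length_drop, hb])]
      exact List.take_of_length_le (by rw [List.length_drop, hb])
    have etail : (fun k => (((b :: t).flatten.drop (4 * k)).take 4)) ∘ (2 + ·)
        = (fun k => ((t.flatten.drop (4 * k)).take 4)) := by
      funext k
      show (((b :: t).flatten.drop (4 * (2 + k))).take 4) = _
      rw [List.flatten_cons, show 4 * (2 + k) = b.length + 4 * k by rw [hb]; ring,
        List.drop_length_add_append]
    rw [show List.range 2 = [0, 1] by rfl]
    simp only [List.map_cons, List.map_nil, e0, e1, etail, List.flatMap_cons]
    rw [ih (fun b hb' => h b (by simp [hb']))]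

lemma flatten_length_of_blocks (l : List (List Char)) (h : ∀ b ∈ l, b.length = 8) :
    l.flatten.length = 8 * l.length := by
  induction l with
  | nil => simp
  | cons b t ih =>
    rw [List.flatten_cons, List.length_append, h b (by simp),
      ih (fun b hb' => h b (by simp [hb']))]
    simp
    ring

lemma dom_char (c : Char) (h : pvDomChar c = true) : c.toNat < 127 := by
  simp [pvDomChar] at h
  omega

-- ===== VERDICT (by name: the statement is the Claim_ definition above) =====
theorem formartHex_spec : Claim_equal_formartHex := by
  intro s hdom
  unfold Spec_formartHex
  show formartHex s = formartHex_alt s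
  simp only [formartHex, formartHex_alt]
  have hd : ∀ c ∈ s.toList, c.toNat < 127 := by
    have h' := hdom
    simp only [Dom_formartHex, pvDomStr, List.all_eq_true] at h'
    intro c hc
    exact dom_char c (h' c hc)
  have hblocks : ∀ b ∈ s.toList.map asciiToBin, b.length = 8 := by
    intro b hb
    obtain ⟨c, hc, rfl⟩ := List.mem_map.mp hb
    exact asciiToBin_length c (hd c hc)
  rw [show (List.foldl (fun acc c => acc ++ asciiToBin c) [] s.toList)
        = (s.toList.map asciiToBin).flatten by
      rw [PySem.List.foldl_append_eq_flatMap]; simp [List.flatMap]]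
  rw [chunk_blocks_core _ (s.toList.map asciiToBin).length
      (flatten_length_of_blocks _ hblocks)]
  rw [map_range_chunks _ hblocks]
  rw [PySem.List.foldl_append_eq_flatMap, List.nil_append]
  congr 1
  rw [List.flatMap_map, List.flatMap_assoc]
  apply List.flatMap_congr
  intro c hc
  simpa using block_eq c (hd c hc)
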